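-- pv_equiv track=rewrite | github.com/chosaihim/jungle_codingTest_study | FEB/13th/용-징검다리.py | solution
-- ===== SOURCE A (Python) =====
-- from collections import deque
-- import heapq
--
-- def solution(stones, k):
--     # 1. 일단 제일 작은 수(n1)를 찾는다.
--     # 2. 그 idx에서 왼쪽으로 k-1번째, 오른쪽으로 k-1번째를 찾아 각각의 최대수를 heap에 넣는다.
--     # 3. 최대수들 중, 최소수가 answer이다.
--     que = deque()
--     minimum = 200000001
--
--     cnt = 1
--     # 첫 원소 추출
--     for i in range(len(stones)):
--         tmp = stones[i]
--         if tmp > minimum: continue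
--         elif tmp < minimum:
--             minimum = tmp
--             que.clear()
--         que.append(i)
--
--     heap = []
--     while que:
--         tmp = que.popleft()
--         maximum = 0
--         for i in range(1, k):
--             # 왼쪽
--             if tmp-i < 0: continue
--             elif stones[tmp-i] > maximum:
--                 maximum = stones[tmp-i]
--         if maximum != 0:
--             heapq.heappush(heap, maximum)
--
--         maximum = 0
--         for i in range(1, k):
--             # 오른쪽
--             if tmp+i > len(stones)-1: continue
--             elif stones[tmp+i] > maximum:
--                 maximum = stones[tmp+i]
--         if maximum != 0:
--             heapq.heappush(heap, maximum)
--
--     answer = heap[0]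
--
--     return answer
-- ===== SOURCE B (Python) =====
-- from collections import deque
--
-- def _winmax(arr, k):
--     # out[i] = max(arr[i-k+1:i]) via a monotonic (decreasing) deque, None if the window is empty
--     out = []
--     dq = deque()
--     for i in range(len(arr)):
--         while dq and dq[0] < i - k + 1:
--             dq.popleft()
--         out.append(arr[dq[0]] if dq else None)
--         while dq and arr[dq[-1]] <= arr[i]:
--             dq.pop()
--         dq.append(i)
--     return out
--
-- def solution(stones, k):
--     # Stage 1: sliding-window maxima for every position in O(n) with monotonic deques;
--     # the right-hand maxima come from running the same pass over the reversed list.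
--     L = _winmax(stones, k)
--     R = _winmax(stones[::-1], k)[::-1]
--     # Stage 2: one scan evaluating the precomputed maxima at the minimum positions.
--     m = min(stones)
--     best = None
--     for i in range(len(stones)):
--         if stones[i] == m:
--             for c in (L[i], R[i]):
--                 if c is not None and 0 < c and (best is None or c < best):
--                     best = c
--     return best
-- ===== Notes on version B (the rewrite author's own statement) =====
-- stated objective: faster
-- what changed: B precomputes sliding-window maxima for every position with monotonic deques (the right-hand windows by running the same pass over the reversed list) and then evaluates them in one scan at the minimum positions, replacing A's per-minimum-position O(k) window scans and its heap by an O(n) staged algorithm.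
import Mathlib
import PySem

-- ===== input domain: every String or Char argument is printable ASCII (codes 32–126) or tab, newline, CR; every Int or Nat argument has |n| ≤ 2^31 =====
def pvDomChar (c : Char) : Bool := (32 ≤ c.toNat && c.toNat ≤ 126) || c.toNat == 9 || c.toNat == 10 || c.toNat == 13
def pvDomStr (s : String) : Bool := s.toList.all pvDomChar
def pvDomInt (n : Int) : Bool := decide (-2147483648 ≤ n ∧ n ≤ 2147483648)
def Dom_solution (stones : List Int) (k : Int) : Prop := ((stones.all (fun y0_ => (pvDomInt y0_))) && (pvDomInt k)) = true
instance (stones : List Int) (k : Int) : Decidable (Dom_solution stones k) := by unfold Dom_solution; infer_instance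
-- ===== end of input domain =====

-- B precomputes sliding-window maxima with monotonic deques (right windows via the same
-- pass on the reversed list) and evaluates them in one scan at the minimum positions,
-- replacing A's per-position window scans and heap (objective: faster, O(n)).

-- ===== PORT A =====
-- heapq._siftdown(heap, 0, pos) with newitem already appended: literal transliteration
def siftdownA (heap : List Int) (pos : Nat) (newitem : Int) : List Int :=
  if 0 < pos then
    let parentpos := (pos - 1) / 2
    let parent := heap.getD parentpos 0
    if newitem < parent then
      siftdownA (heap.set pos parent) parentpos newitem
    else heap.set pos newitem
  else heap.set pos newitem
termination_by pos
decreasing_by exact lt_of_le_of_lt (Nat.div_le_self _ _) (by omega)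

-- heapq.heappush(heap, item)
def heappushA (heap : List Int) (item : Int) : List Int :=
  siftdownA (heap ++ [item]) heap.length item

-- A's left-window scan: for i in range(1, k): if tmp-i < 0: continue elif stones[tmp-i] > maximum: ...
def leftMaxA (stones : List Int) (k tmp : Int) : Int :=
  (PySem.List.pyRange 1 k 1).foldl
    (fun maximum i =>
      if tmp - i < 0 then maximum
      else if PySem.List.pyGetD stones (tmp - i) 0 > maximum then PySem.List.pyGetD stones (tmp - i) 0
      else maximum) 0

-- A's right-window scan
def rightMaxA (stones : List Int) (k tmp : Int) : Int :=
  (PySem.List.pyRange 1 k 1).foldl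
    (fun maximum i =>
      if tmp + i > PySem.List.len stones - 1 then maximum
      else if PySem.List.pyGetD stones (tmp + i) 0 > maximum then PySem.List.pyGetD stones (tmp + i) 0
      else maximum) 0

-- A's 'while que:' loop
def solLoop2 (stones : List Int) (k : Int) : List Int → List Int → List Int
  | [], heap => heap
  | tmp :: que, heap =>
    let m1 := leftMaxA stones k tmp
    let heap1 := if m1 ≠ 0 then heappushA heap m1 else heap
    let m2 := rightMaxA stones k tmp
    let heap2 := if m2 ≠ 0 then heappushA heap1 m2 else heap1
    solLoop2 stones k que heap2

def solution (stones : List Int) (k : Int) : Int :=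
  let st := (PySem.List.pyRange 0 (PySem.List.len stones) 1).foldl
    (fun s i =>
      let tmp := PySem.List.pyGetD stones i 0
      if tmp > s.1 then s
      else
        let s' := if tmp < s.1 then (tmp, ([] : List Int)) else s
        (s'.1, s'.2 ++ [i]))
    ((200000001 : Int), ([] : List Int))
  let heap := solLoop2 stones k st.2 []
  PySem.List.pyGetD heap 0 0   -- heap[0]; IndexError on empty heap is excluded by Pre_solution

-- ===== PORT B =====
-- Python 'while dq and p(dq[-1]): dq.pop()': pop from the BACK while p holds (exact)
def popBackWhile (p : Int → Bool) (dq : List Int) : List Int :=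
  (dq.reverse.dropWhile p).reverse

-- one iteration of _winmax's for-loop; state = (out, dq)
def winmaxStep (arr : List Int) (k : Int) (s : List (Option Int) × List Int) (i : Int) :
    List (Option Int) × List Int :=
  let dq := s.2.dropWhile (fun j => decide (j < i - k + 1))    -- while dq and dq[0] < i-k+1: popleft
  let out := s.1 ++ [match dq with
    | [] => none
    | j :: _ => some (PySem.List.pyGetD arr j 0)]              -- out.append(arr[dq[0]] if dq else None)
  let dq' := popBackWhile
      (fun j => decide (PySem.List.pyGetD arr j 0 ≤ PySem.List.pyGetD arr i 0)) dq
  (out, dq' ++ [i])                                            -- dq.append(i)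

-- _winmax(arr, k): out[i] = max(arr[i-k+1:i]) via a monotonic deque, None if empty window
def winmax (arr : List Int) (k : Int) : List (Option Int) :=
  ((PySem.List.pyRange 0 (PySem.List.len arr) 1).foldl (winmaxStep arr k) ([], [])).1

-- 'if c is not None and 0 < c and (best is None or c < best): best = c'
def bestUpd (b : Option Int) (c : Option Int) : Option Int :=
  match c with
  | none => b
  | some cv => if 0 < cv then
      match b with
      | none => some cv
      | some bv => if cv < bv then some cv else b
    else b

def solution_alt (stones : List Int) (k : Int) : Int :=
  let L := winmax stones k
  let R := (PySem.List.slice? (winmax ((PySem.List.slice? stones none none (-1)).getD []) k)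
              none none (-1)).getD []                           -- _winmax(stones[::-1], k)[::-1]
  let m := (PySem.List.min? stones (fun x => x)).getD 0        -- min(stones); [] excluded by Pre_solution
  let best := (PySem.List.pyRange 0 (PySem.List.len stones) 1).foldl
    (fun b i =>
      if PySem.List.pyGetD stones i 0 = m then
        bestUpd (bestUpd b (PySem.List.pyGetD L i none)) (PySem.List.pyGetD R i none)
      else b) none
  best.getD 0   -- 'return best'; best is None only outside Pre_solution

-- ===== PRECONDITION & SPEC =====
-- the value A's first loop ends with: min(stones) capped at the sentinel 200000001
def minSent (stones : List Int) : Int := stones.foldl min 200000001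

-- Pre_solution = exactly the inputs where A returns (elsewhere A raises IndexError on heap[0],
-- and B returns None, which is no Int): some position p of the (sentinel-capped) minimum value
-- has a strictly positive stone within distance k-1.
def Pre_solution (stones : List Int) (k : Int) : Prop :=
  ∃ p ∈ PySem.List.enumerate stones 0, p.2 = minSent stones ∧
    ∃ q ∈ PySem.List.enumerate stones 0, 0 < q.2 ∧ q.1 ≠ p.1 ∧ p.1 - q.1 < k ∧ q.1 - p.1 < k
instance (stones : List Int) (k : Int) : Decidable (Pre_solution stones k) := by
  unfold Pre_solution; infer_instance

def pvWitness_solution : List Int × Int := ([1, 2], 2)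

def Spec_solution (stones : List Int) (k : Int) (out : Int) : Prop := out = solution_alt stones k
instance (stones : List Int) (k : Int) (out : Int) : Decidable (Spec_solution stones k out) := by
  unfold Spec_solution; infer_instance

-- ===== CLAIM (what is proved, stated in full; the proofs are below) =====
def Claim_equal_solution : Prop := ∀ (stones : List Int) (k : Int), Dom_solution stones k → Pre_solution stones k → Spec_solution stones k (solution stones k)

-- ===== LEMMAS AND PROOFS =====

-- ---- the first loop of A: characterisation of (minimum, que) ----

def bodyP (s : Int × List Int) (p : Int × Int) : Int × List Int :=
  if p.2 > s.1 then s
  else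
    let s' := if p.2 < s.1 then (p.2, ([] : List Int)) else s
    (s'.1, s'.2 ++ [p.1])

lemma loop1_gen (l : List (Int × Int)) : ∀ (mn : Int) (qe : List Int),
    l.foldl bodyP (mn, qe) =
      (l.foldl (fun a p => min a p.2) mn,
       (if l.foldl (fun a p => min a p.2) mn < mn then [] else qe) ++
         (l.filter (fun p => p.2 = l.foldl (fun a p => min a p.2) mn)).map (·.1)) := by
  induction l with
  | nil => intro mn qe; simp
  | cons p l ih =>
    intro mn qe
    have hmap : ∀ x : Int, l.foldl (fun a q => min a q.2) x = (l.map (·.2)).foldl min x :=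
      fun x => (List.foldl_map).symm
    rcases lt_trichotomy p.2 mn with hlt | heq | hgt
    · have hb : bodyP (mn, qe) p = (p.2, [p.1]) := by
        simp [bodyP, hlt, not_lt.2 hlt.le]
      have hmin : min mn p.2 = p.2 := min_eq_right hlt.le
      have hM : l.foldl (fun a q => min a q.2) p.2 ≤ p.2 := by
        rw [hmap]; exact (PySem.List.foldl_min_le _ _).1
      rw [List.foldl_cons, List.foldl_cons, hb, ih, hmin]
      by_cases hMp : l.foldl (fun a q => min a q.2) p.2 < p.2
      · simp [hMp, List.filter_cons, ne_of_gt hMp, lt_of_lt_of_le hMp hlt.le]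
      · have hEq : l.foldl (fun a q => min a q.2) p.2 = p.2 := le_antisymm hM (not_lt.1 hMp)
        simp [hMp, hlt, List.filter_cons, hEq]
    · have hb : bodyP (mn, qe) p = (mn, qe ++ [p.1]) := by
        simp [bodyP, heq]
      have hmin : min mn p.2 = mn := by rw [heq]; exact min_self mn
      have hM : l.foldl (fun a q => min a q.2) mn ≤ mn := by
        rw [hmap]; exact (PySem.List.foldl_min_le _ _).1
      rw [List.foldl_cons, List.foldl_cons, hb, ih, hmin]
      by_cases hMp : l.foldl (fun a q => min a q.2) mn < mn
      · have : p.2 ≠ l.foldl (fun a q => min a q.2) mn := by rw [heq]; exact (ne_of_gt hMp)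
        simp [hMp, List.filter_cons, this]
      · have hEq : l.foldl (fun a q => min a q.2) mn = mn := le_antisymm hM (not_lt.1 hMp)
        have : p.2 = l.foldl (fun a q => min a q.2) mn := by rw [heq, hEq]
        simp [hMp, List.filter_cons, this]
    · have hb : bodyP (mn, qe) p = (mn, qe) := by
        simp [bodyP, hgt]
      have hmin : min mn p.2 = mn := min_eq_left hgt.le
      have hM : l.foldl (fun a q => min a q.2) mn ≤ mn := by
        rw [hmap]; exact (PySem.List.foldl_min_le _ _).1
      have hne : p.2 ≠ l.foldl (fun a q => min a q.2) mn := ne_of_gt (lt_of_le_of_lt hM hgt)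
      rw [List.foldl_cons, List.foldl_cons, hb, ih, hmin]
      simp [List.filter_cons, hne]


lemma loop1_char (stones : List Int) :
    (PySem.List.pyRange 0 (PySem.List.len stones) 1).foldl
      (fun s i =>
        let tmp := PySem.List.pyGetD stones i 0
        if tmp > s.1 then s
        else
          let s' := if tmp < s.1 then (tmp, ([] : List Int)) else s
          (s'.1, s'.2 ++ [i]))
      ((200000001 : Int), ([] : List Int)) =
    (minSent stones,
     ((PySem.List.enumerate stones 0).filter (fun p => p.2 = minSent stones)).map (·.1)) := by
  have h1 : (PySem.List.pyRange 0 (PySem.List.len stones) 1).foldl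
      (fun s i =>
        let tmp := PySem.List.pyGetD stones i 0
        if tmp > s.1 then s
        else
          let s' := if tmp < s.1 then (tmp, ([] : List Int)) else s
          (s'.1, s'.2 ++ [i]))
      ((200000001 : Int), ([] : List Int)) =
      (PySem.List.enumerate stones 0).foldl bodyP ((200000001 : Int), ([] : List Int)) := by
    rw [PySem.List.enumerate_eq_map_pyRange stones 0, List.foldl_map]
    rfl
  have h2 : minSent stones
      = (PySem.List.enumerate stones 0).foldl (fun a p => min a p.2) 200000001 := by
    conv_lhs => rw [minSent, ← PySem.List.map_snd_enumerate stones 0]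
    exact List.foldl_map
  rw [h1, loop1_gen, ← h2]
  simp
-- ---- windows (A side) ----

lemma foldl_max_shift (t : List Int) : ∀ (a b : Int), t.foldl max (max a b) = max a (t.foldl max b) := by
  induction t with
  | nil => intro a b; rfl
  | cons c t ih =>
    intro a b
    rw [List.foldl_cons, List.foldl_cons, max_assoc, ih]


lemma guard_fold (l : List Int) (p : Int → Prop) [DecidablePred p] (v : Int → Int) :
    ∀ acc : Int, 0 ≤ acc →
      l.foldl (fun a i => if p i then a else if v i > a then v i else a) acc
        = l.foldl (fun a i => max a (if p i then 0 else v i)) acc := by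
  induction l with
  | nil => intro acc _; rfl
  | cons c l ih =>
    intro acc hacc
    rw [List.foldl_cons, List.foldl_cons]
    by_cases hc : p c
    · simp only [if_pos hc]
      rw [max_eq_left hacc, ih acc hacc]
    · simp only [if_neg hc]
      have hbody : (if v c > acc then v c else acc) = max acc (v c) := by
        rcases le_or_gt (v c) acc with h | h
        · rw [if_neg (not_lt.2 h), max_eq_left h]
        · rw [if_pos h, max_eq_right h.le]
      rw [hbody, ih _ (le_trans hacc (le_max_left _ _))]

lemma foldmax_eq_of_mem (l m : List Int)
    (h1 : ∀ y ∈ l, y = 0 ∨ y ∈ m) (h2 : ∀ y ∈ m, y = 0 ∨ y ∈ l) :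
    l.foldl max 0 = m.foldl max 0 := by
  have key : ∀ (a b : List Int), (∀ y ∈ a, y = 0 ∨ y ∈ b) →
      a.foldl max 0 ≤ b.foldl max 0 := by
    intro a b hab
    rcases PySem.List.foldl_max_mem a 0 with h | h
    · rw [h]; exact (PySem.List.le_foldl_max b 0).1
    · rcases hab _ h with h0 | hmem
      · rw [h0]; exact (PySem.List.le_foldl_max b 0).1
      · exact (PySem.List.le_foldl_max b 0).2 _ hmem
  exact le_antisymm (key l m h1) (key m l h2)

lemma mem_slice_iff (stones : List Int) (a b y : Int) (ha : 0 ≤ a) (hb : 0 ≤ b) :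
    y ∈ PySem.List.slice stones (some a) (some b) ↔
      ∃ j : Nat, a ≤ (j : Int) ∧ (j : Int) < b ∧ j < stones.length ∧ y = stones.getD j 0 := by
  rw [PySem.List.slice_toNat stones ha hb]
  constructor
  · intro hy
    obtain ⟨r, hr, hy⟩ := List.mem_iff_getElem.1 hy
    have hlen : r < b.toNat - a.toNat ∧ a.toNat + r < stones.length := by
      have := hr
      simp only [List.length_take, List.length_drop] at this
      omega
    refine ⟨a.toNat + r, by omega, by omega, hlen.2, ?_⟩
    rw [List.getD_eq_getElem _ _ hlen.2, ← hy, List.getElem_take, List.getElem_drop]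
  · rintro ⟨j, hja, hjb, hjn, rfl⟩
    have hr : j - a.toNat < (List.take (b.toNat - a.toNat) (List.drop a.toNat stones)).length := by
      simp only [List.length_take, List.length_drop]
      omega
    rw [List.mem_iff_getElem]
    refine ⟨j - a.toNat, hr, ?_⟩
    rw [List.getElem_take, List.getElem_drop, List.getD_eq_getElem _ _ hjn]
    congr 1
    omega

-- running max with a skip-guard = running max of a 0-defaulted projection
lemma leftMaxA_proj (stones : List Int) (k tmp : Int) :
    leftMaxA stones k tmp =
      ((PySem.List.pyRange 1 k 1).map
        (fun i => if tmp - i < 0 then 0 else PySem.List.pyGetD stones (tmp - i) 0)).foldl max 0 := by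
  rw [leftMaxA, List.foldl_map]
  exact guard_fold (PySem.List.pyRange 1 k 1) (fun i => tmp - i < 0)
    (fun i => PySem.List.pyGetD stones (tmp - i) 0) 0 le_rfl

lemma rightMaxA_proj (stones : List Int) (k tmp : Int) :
    rightMaxA stones k tmp =
      ((PySem.List.pyRange 1 k 1).map
        (fun i => if tmp + i > PySem.List.len stones - 1 then 0
                  else PySem.List.pyGetD stones (tmp + i) 0)).foldl max 0 := by
  rw [rightMaxA, List.foldl_map]
  exact guard_fold (PySem.List.pyRange 1 k 1) (fun i => tmp + i > PySem.List.len stones - 1)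
    (fun i => PySem.List.pyGetD stones (tmp + i) 0) 0 le_rfl

lemma leftMaxA_eq (stones : List Int) (k tmp : Int) (hk : 0 < k)
    (h0 : 0 ≤ tmp) (h1 : tmp < stones.length) :
    leftMaxA stones k tmp =
      (PySem.List.slice stones (some (max (tmp - k + 1) 0)) (some tmp)).foldl max 0 := by
  rw [leftMaxA_proj]
  apply foldmax_eq_of_mem
  · intro y hy
    obtain ⟨i, hi, rfl⟩ := List.mem_map.1 hy
    rw [PySem.List.mem_pyRange_one] at hi
    by_cases hneg : tmp - i < 0
    · left; rw [if_pos hneg]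
    · right
      push_neg at hneg
      have hlt : tmp - i < (stones.length : Int) := by omega
      rw [if_neg (not_lt.2 hneg), mem_slice_iff _ _ _ _ (le_max_right _ _) h0]
      refine ⟨(tmp - i).toNat, ?_, ?_, ?_, ?_⟩
      · have := Int.toNat_of_nonneg hneg; omega
      · have := Int.toNat_of_nonneg hneg; omega
      · omega
      · rw [PySem.List.pyGetD_eq_getElem stones 0 hneg hlt,
            List.getD_eq_getElem stones 0 (by omega)]
  · intro y hy
    rw [mem_slice_iff _ _ _ _ (le_max_right _ _) h0] at hy
    obtain ⟨j, hj1, hj2, hj3, rfl⟩ := hy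
    right
    refine List.mem_map.2 ⟨tmp - j, ?_, ?_⟩
    · rw [PySem.List.mem_pyRange_one]
      have := le_trans (le_max_left (tmp - k + 1) 0) hj1
      omega
    · have he : tmp - (tmp - (j : Int)) = (j : Int) := by ring
      have hneg : ¬ (tmp - (tmp - (j : Int)) < 0) := by omega
      rw [if_neg hneg, he, PySem.List.pyGetD_eq_getElem stones 0 (by omega) (by omega),
          List.getD_eq_getElem stones 0 hj3]
      simp

lemma rightMaxA_eq (stones : List Int) (k tmp : Int) (hk : 0 < k)
    (h0 : 0 ≤ tmp) (h1 : tmp < stones.length) :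
    rightMaxA stones k tmp =
      (PySem.List.slice stones (some (tmp + 1)) (some (tmp + k))).foldl max 0 := by
  rw [rightMaxA_proj]
  have hlen : PySem.List.len stones = (stones.length : Int) := PySem.List.len_eq stones
  apply foldmax_eq_of_mem
  · intro y hy
    obtain ⟨i, hi, rfl⟩ := List.mem_map.1 hy
    rw [PySem.List.mem_pyRange_one] at hi
    by_cases hc : tmp + i > PySem.List.len stones - 1
    · left; rw [if_pos hc]
    · right
      rw [hlen] at hc; push_neg at hc
      rw [if_neg (by rw [hlen]; push_neg; exact hc),
          mem_slice_iff _ _ _ _ (by omega) (by omega)]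
      refine ⟨(tmp + i).toNat, ?_, ?_, ?_, ?_⟩
      · have := Int.toNat_of_nonneg (show (0:Int) ≤ tmp + i by omega); omega
      · have := Int.toNat_of_nonneg (show (0:Int) ≤ tmp + i by omega); omega
      · omega
      · rw [PySem.List.pyGetD_eq_getElem stones 0 (by omega) (by omega),
            List.getD_eq_getElem stones 0 (by omega)]
  · intro y hy
    rw [mem_slice_iff _ _ _ _ (by omega) (by omega)] at hy
    obtain ⟨j, hj1, hj2, hj3, rfl⟩ := hy
    right
    refine List.mem_map.2 ⟨(j : Int) - tmp, ?_, ?_⟩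
    · rw [PySem.List.mem_pyRange_one]; omega
    · have he : tmp + ((j : Int) - tmp) = (j : Int) := by ring
      have hc : ¬ (tmp + ((j : Int) - tmp) > PySem.List.len stones - 1) := by
        rw [hlen]; omega
      rw [if_neg hc, he, PySem.List.pyGetD_eq_getElem stones 0 (by omega) (by omega),
          List.getD_eq_getElem stones 0 hj3]
      simp
-- ---- the heap ----

def IsHeap (h : List Int) : Prop :=
  ∀ j : Nat, 0 < j → j < h.length → h.getD ((j - 1) / 2) 0 ≤ h.getD j 0

lemma swap0 (t : List Int) : ∀ (p : Nat) (x h : Int), p < t.length →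
    (x :: t.set p h).Perm (h :: t.set p x) := by
  induction t with
  | nil => intro p x h hp; simp at hp
  | cons c t ih =>
    intro p x h hp
    cases p with
    | zero => simpa using List.Perm.swap h x t
    | succ p =>
      simp only [List.set_cons_succ]
      exact (List.Perm.swap c x _).trans
        (((ih p x h (by simpa using hp)).cons c).trans (List.Perm.swap h c _))


lemma swap_perm (l : List Int) : ∀ (p q : Nat) (x : Int), q < p → p < l.length →
    ((l.set p (l.getD q 0)).set q x).Perm (l.set p x) := by
  induction l with
  | nil => intro p q x hqp hp; simp at hp
  | cons c t ih =>
    intro p q x hqp hp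
    cases q with
    | zero =>
      cases p with
      | zero => omega
      | succ p =>
        simp only [List.getD_cons_zero, List.set_cons_succ, List.set_cons_zero]
        exact swap0 t p x c (by simpa using hp)
    | succ q =>
      cases p with
      | zero => omega
      | succ p =>
        simp only [List.getD_cons_succ, List.set_cons_succ]
        exact (ih p q x (by omega) (by simpa using hp)).cons c


lemma getD_set_self (l : List Int) (i : Nat) (a : Int) (h : i < l.length) :
    (l.set i a).getD i 0 = a := by
  rw [List.getD_eq_getElem?_getD, List.getElem?_set, if_pos rfl, if_pos h]
  rfl

lemma getD_set_other (l : List Int) (i j : Nat) (a : Int) (h : i ≠ j) :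
    (l.set i a).getD j 0 = l.getD j 0 := by
  rw [List.getD_eq_getElem?_getD, List.getElem?_set, if_neg h, ← List.getD_eq_getElem?_getD]

lemma siftdownA_spec (pos : Nat) : ∀ (heap : List Int) (x : Int),
    pos < heap.length →
    (∀ j : Nat, 0 < j → j < heap.length → j ≠ pos →
      (heap.set pos x).getD ((j - 1) / 2) 0 ≤ (heap.set pos x).getD j 0) →
    (0 < pos → ∀ c : Nat, c < heap.length → (c - 1) / 2 = pos →
      heap.getD ((pos - 1) / 2) 0 ≤ heap.getD c 0) →
    IsHeap (siftdownA heap pos x) ∧ (siftdownA heap pos x).Perm (heap.set pos x) := by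
  induction pos using Nat.strong_induction_on with
  | _ pos ih =>
    intro heap x hlen hA1 hA2
    have hv1 : ∀ t : Nat, (heap.set pos x).getD t 0 = if t = pos then x else heap.getD t 0 := by
      intro t
      by_cases h1 : t = pos
      · rw [if_pos h1, h1]; exact getD_set_self heap pos x hlen
      · rw [if_neg h1]; exact getD_set_other heap pos t x (fun he => h1 he.symm)
    by_cases hpos : 0 < pos
    · have hppos : (pos - 1) / 2 < pos := by omega
      have hunf : siftdownA heap pos x =
          if x < heap.getD ((pos - 1) / 2) 0 then
            siftdownA (heap.set pos (heap.getD ((pos - 1) / 2) 0)) ((pos - 1) / 2) x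
          else heap.set pos x := by
        rw [siftdownA, if_pos hpos]
      by_cases hx : x < heap.getD ((pos - 1) / 2) 0
      · rw [hunf, if_pos hx]
        have hvp : ∀ t : Nat, (heap.set pos (heap.getD ((pos - 1) / 2) 0)).getD t 0 =
            if t = pos then heap.getD ((pos - 1) / 2) 0 else heap.getD t 0 := by
          intro t
          by_cases h1 : t = pos
          · rw [if_pos h1, h1]; exact getD_set_self heap pos _ hlen
          · rw [if_neg h1]; exact getD_set_other heap pos t _ (fun he => h1 he.symm)
        have hv : ∀ t : Nat, ((heap.set pos (heap.getD ((pos - 1) / 2) 0)).set ((pos - 1) / 2) x).getD t 0 =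
            if t = (pos - 1) / 2 then x
            else if t = pos then heap.getD ((pos - 1) / 2) 0 else heap.getD t 0 := by
          intro t
          by_cases h1 : t = (pos - 1) / 2
          · rw [if_pos h1, h1]
            exact getD_set_self _ _ x (by rw [List.length_set]; omega)
          · rw [if_neg h1, getD_set_other _ _ _ _ (fun he => h1 he.symm)]
            exact hvp t
        obtain ⟨H1, H2⟩ := ih ((pos - 1) / 2) hppos (heap.set pos (heap.getD ((pos - 1) / 2) 0)) x
          (by rw [List.length_set]; omega)
          (by
            intro j hj0 hjlen hjne
            rw [List.length_set] at hjlen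
            rw [hv, hv]
            by_cases hjp : j = pos
            · subst hjp
              rw [if_pos rfl, if_neg (by omega), if_pos rfl]
              exact hx.le
            · rw [if_neg hjp]
              by_cases hj2 : (j - 1) / 2 = (pos - 1) / 2
              · rw [if_pos hj2, if_neg hjne]
                have h5 := hA1 j hj0 hjlen hjp
                rw [hv1, hv1, if_neg (by omega), if_neg hjp, hj2] at h5
                exact le_trans hx.le h5
              · by_cases hj3 : (j - 1) / 2 = pos
                · rw [if_neg hj2, if_pos hj3, if_neg hjne]
                  exact hA2 hpos j hjlen hj3
                · rw [if_neg hj2, if_neg hj3, if_neg hjne]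
                  have h5 := hA1 j hj0 hjlen hjp
                  rw [hv1, hv1, if_neg hj3, if_neg hjp] at h5
                  exact h5)
          (by
            intro hpp0 c hclen hcpp
            rw [List.length_set] at hclen
            have hstep : heap.getD (((pos - 1) / 2 - 1) / 2) 0 ≤ heap.getD ((pos - 1) / 2) 0 := by
              have h5 := hA1 ((pos - 1) / 2) hpp0 (by omega) (by omega)
              rw [hv1, hv1, if_neg (by omega), if_neg (by omega)] at h5
              exact h5
            rw [hvp, hvp, if_neg (by omega)]
            by_cases hc : c = pos
            · rw [if_pos hc]
              exact hstep
            · rw [if_neg hc]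
              have h6 := hA1 c (by omega) hclen hc
              rw [hv1, hv1, if_neg (by omega), if_neg hc, hcpp] at h6
              exact le_trans hstep h6)
        exact ⟨H1, H2.trans (swap_perm heap pos ((pos - 1) / 2) x hppos hlen)⟩
      · rw [hunf, if_neg hx]
        refine ⟨?_, List.Perm.refl _⟩
        intro j hj0 hjlen
        rw [List.length_set] at hjlen
        rw [hv1, hv1]
        by_cases hjp : j = pos
        · subst hjp
          rw [if_pos rfl, if_neg (by omega)]
          exact not_lt.1 hx
        · rw [if_neg hjp]
          by_cases hj3 : (j - 1) / 2 = pos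
          · rw [if_pos hj3]
            have h5 := hA1 j hj0 hjlen hjp
            rw [hv1, hv1, if_pos hj3, if_neg hjp] at h5
            exact h5
          · rw [if_neg hj3]
            have h5 := hA1 j hj0 hjlen hjp
            rw [hv1, hv1, if_neg hj3, if_neg hjp] at h5
            exact h5
    · have hunf0 : siftdownA heap pos x = heap.set pos x := by
        rw [siftdownA, if_neg hpos]
      rw [hunf0]
      refine ⟨?_, List.Perm.refl _⟩
      intro j hj0 hjlen
      rw [List.length_set] at hjlen
      exact hA1 j hj0 hjlen (by omega)

lemma heappushA_spec (h : List Int) (x : Int) (hh : IsHeap h) :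
    IsHeap (heappushA h x) ∧ (heappushA h x).Perm (h ++ [x]) := by
  have hset : (h ++ [x]).set h.length x = h ++ [x] := by
    rw [List.set_append, if_neg (lt_irrefl _)]
    simp
  have hgd : ∀ j, j < h.length → (h ++ [x]).getD j 0 = h.getD j 0 :=
    fun j hj => List.getD_append h [x] 0 j hj
  have hlen : h.length < (h ++ [x]).length := by simp
  obtain ⟨H1, H2⟩ := siftdownA_spec h.length (h ++ [x]) x hlen
    (by
      intro j hj0 hjlen hjne
      have hjlt : j < h.length := by
        simp only [List.length_append, List.length_cons, List.length_nil] at hjlen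
        omega
      rw [hset, hgd j hjlt, hgd _ (by omega)]
      exact hh j hj0 hjlt)
    (by
      intro hpos c hclen hcpar
      exfalso
      simp only [List.length_append, List.length_cons, List.length_nil] at hclen
      omega)
  rw [hset] at H2
  rw [heappushA]
  exact ⟨H1, H2⟩

lemma heap_root_le (h : List Int) (hh : IsHeap h) : ∀ j : Nat, j < h.length →
    h.getD 0 0 ≤ h.getD j 0 := by
  intro j
  induction j using Nat.strong_induction_on with
  | _ j ih =>
    intro hj
    cases j with
    | zero => exact le_refl _
    | succ j =>
      have h1 := hh (j + 1) (Nat.succ_pos j) hj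
      have h2 := ih ((j + 1 - 1) / 2) (by omega) (by omega)
      exact le_trans h2 h1


lemma heap_root_min (h : List Int) (hh : IsHeap h) (hne : h ≠ []) :
    h.getD 0 0 ∈ h ∧ ∀ y ∈ h, h.getD 0 0 ≤ y := by
  constructor
  · cases h with
    | nil => exact absurd rfl hne
    | cons c t => exact List.mem_cons_self
  · intro y hy
    obtain ⟨j, hj, rfl⟩ := List.mem_iff_getElem.1 hy
    have := heap_root_le h hh j hj
    rwa [List.getD_eq_getElem h 0 hj] at this

-- A pushes per position, in order
def pushesA (stones : List Int) (k : Int) (tmp : Int) : List Int :=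
  (if leftMaxA stones k tmp ≠ 0 then [leftMaxA stones k tmp] else []) ++
  (if rightMaxA stones k tmp ≠ 0 then [rightMaxA stones k tmp] else [])

lemma solLoop2_spec (stones : List Int) (k : Int) : ∀ (que heap : List Int),
    IsHeap heap →
    IsHeap (solLoop2 stones k que heap) ∧
      (solLoop2 stones k que heap).Perm (heap ++ que.flatMap (pushesA stones k)) := by
  intro que
  induction que with
  | nil =>
    intro heap hh
    exact ⟨hh, by simp [solLoop2]⟩
  | cons tmp que ih =>
    intro heap hh
    have hstep : ∀ (h0 : List Int), IsHeap h0 → ∀ v : Int,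
        IsHeap (if v ≠ 0 then heappushA h0 v else h0) ∧
          (if v ≠ 0 then heappushA h0 v else h0).Perm (h0 ++ (if v ≠ 0 then [v] else [])) := by
      intro h0 hh0 v
      by_cases hv : v ≠ 0
      · rw [if_pos hv, if_pos hv]
        exact heappushA_spec h0 v hh0
      · rw [if_neg hv, if_neg hv]
        exact ⟨hh0, by simp⟩
    obtain ⟨ih1, ip1⟩ := hstep heap hh (leftMaxA stones k tmp)
    obtain ⟨ih2, ip2⟩ := hstep _ ih1 (rightMaxA stones k tmp)
    obtain ⟨jh, jp⟩ := ih _ ih2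
    have hdef : solLoop2 stones k (tmp :: que) heap =
        solLoop2 stones k que
          (if rightMaxA stones k tmp ≠ 0 then
            heappushA (if leftMaxA stones k tmp ≠ 0 then heappushA heap (leftMaxA stones k tmp) else heap)
              (rightMaxA stones k tmp)
           else (if leftMaxA stones k tmp ≠ 0 then heappushA heap (leftMaxA stones k tmp) else heap)) := rfl
    rw [hdef]
    refine ⟨jh, ?_⟩
    refine jp.trans ?_
    refine ((ip2.append_right _).trans ((ip1.append_right _).append_right _)).trans ?_
    rw [List.flatMap_cons, pushesA]
    simp [List.append_assoc]

lemma flatMap_filter_of_nil {α β : Type} (l : List α) (p : α → Bool) (f : α → List β)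
    (h : ∀ x ∈ l, p x = false → f x = []) : l.flatMap f = (l.filter p).flatMap f := by
  induction l with
  | nil => rfl
  | cons x l ih =>
    rw [List.flatMap_cons, List.filter_cons]
    cases hpx : p x with
    | true =>
      rw [if_pos rfl, List.flatMap_cons, ih (fun y hy hpy => h y (List.mem_cons_of_mem _ hy) hpy)]
    | false =>
      rw [if_neg (by simp), h x List.mem_cons_self hpx, List.nil_append,
          ih (fun y hy hpy => h y (List.mem_cons_of_mem _ hy) hpy)]

lemma min?_getD_eq_minSent (stones : List Int) (h : minSent stones ∈ stones)
    (hle : ∀ y ∈ stones, minSent stones ≤ y) :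
    (PySem.List.min? stones (fun x => x)).getD 0 = minSent stones := by
  cases stones with
  | nil => cases h
  | cons a t =>
    rw [PySem.List.min?_id_cons]
    simp only [Option.getD_some]
    have h1 : ∀ y ∈ (a :: t), t.foldl min a ≤ y := by
      intro y hy
      rcases List.mem_cons.1 hy with h' | hy
      · rw [h']; exact (PySem.List.foldl_min_le t a).1
      · exact (PySem.List.foldl_min_le t a).2 y hy
    have h2 : t.foldl min a ∈ (a :: t) := by
      rcases PySem.List.foldl_min_mem t a with h' | h'
      · rw [h']; exact List.mem_cons_self
      · exact List.mem_cons_of_mem _ h'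
    exact le_antisymm (h1 _ h) (hle _ h2)

-- ---- B side: the monotonic deque pass ----

-- max of a nonempty list as an Option (maxOpt [] = none), the spec of one deque output
def maxOpt : List Int → Option Int
  | [] => none
  | x :: t => some (t.foldl max x)

lemma maxOpt_eq_none_iff (l : List Int) : maxOpt l = none ↔ l = [] := by
  cases l <;> simp [maxOpt]

lemma maxOpt_mem {l : List Int} {M : Int} (h : maxOpt l = some M) : M ∈ l := by
  cases l with
  | nil => cases h
  | cons x t =>
    simp only [maxOpt, Option.some.injEq] at h
    rcases PySem.List.foldl_max_mem t x with h' | h'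
    · rw [← h, h']; exact List.mem_cons_self
    · rw [← h]; exact List.mem_cons_of_mem _ h'

lemma maxOpt_ub {l : List Int} {M : Int} (h : maxOpt l = some M) : ∀ y ∈ l, y ≤ M := by
  cases l with
  | nil => intro y hy; cases hy
  | cons x t =>
    simp only [maxOpt, Option.some.injEq] at h
    intro y hy
    rcases List.mem_cons.1 hy with h' | hy
    · rw [h', ← h]; exact (PySem.List.le_foldl_max t x).1
    · rw [← h]; exact (PySem.List.le_foldl_max t x).2 y hy

lemma maxOpt_eq_of_mem (l m : List Int) (h : ∀ y, y ∈ l ↔ y ∈ m) : maxOpt l = maxOpt m := by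
  cases hl : maxOpt l with
  | none =>
    rw [maxOpt_eq_none_iff] at hl
    cases hm : maxOpt m with
    | none => rfl
    | some M =>
      exfalso
      have := (h M).2 (maxOpt_mem hm)
      rw [hl] at this
      cases this
  | some M =>
    cases hm : maxOpt m with
    | none =>
      exfalso
      rw [maxOpt_eq_none_iff] at hm
      have := (h M).1 (maxOpt_mem hl)
      rw [hm] at this
      cases this
    | some N =>
      have h1 : M ≤ N := maxOpt_ub hm M ((h M).1 (maxOpt_mem hl))
      have h2 : N ≤ M := maxOpt_ub hl N ((h N).2 (maxOpt_mem hm))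
      rw [le_antisymm h1 h2]

-- 'while' pops on a sorted deque are filters
lemma dropWhile_eq_filter_of_mono {α : Type} (p : α → Bool) :
    ∀ (l : List α), l.Pairwise (fun a b => p b = true → p a = true) →
      l.dropWhile p = l.filter (fun a => ! p a) := by
  intro l
  induction l with
  | nil => intro _; rfl
  | cons a l ih =>
    intro hp
    obtain ⟨ha, hl⟩ := List.pairwise_cons.1 hp
    cases hpa : p a with
    | true =>
      rw [List.dropWhile_cons_of_pos hpa, List.filter_cons, ih hl]
      simp [hpa]
    | false =>
      rw [List.dropWhile_cons_of_neg (by simp [hpa]), List.filter_cons]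
      have hall : l.filter (fun a => ! p a) = l := by
        apply List.filter_eq_self.2
        intro b hb
        cases hpb : p b with
        | true => exact absurd (ha b hb hpb) (by simp [hpa])
        | false => simp
      rw [hall]
      simp [hpa]

-- the deque invariant before processing index i
def dqInv (arr : List Int) (k i : Int) (dq : List Int) : Prop :=
  (∀ j ∈ dq, 0 ≤ j ∧ j < i) ∧
  dq.Pairwise (fun a b => a < b ∧ PySem.List.pyGetD arr b 0 < PySem.List.pyGetD arr a 0) ∧
  (∀ t : Int, i - k + 1 ≤ t → 0 ≤ t → t < i →
    ∃ j ∈ dq, t ≤ j ∧ PySem.List.pyGetD arr t 0 ≤ PySem.List.pyGetD arr j 0)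

-- the back pop on a value-decreasing deque is a filter
lemma popBack_filter (arr : List Int) (vi : Int) (dq1 : List Int)
    (hpair1 : dq1.Pairwise (fun a b => a < b ∧ PySem.List.pyGetD arr b 0 < PySem.List.pyGetD arr a 0)) :
    popBackWhile (fun j => decide (PySem.List.pyGetD arr j 0 ≤ vi)) dq1 =
      dq1.filter (fun j => ! decide (PySem.List.pyGetD arr j 0 ≤ vi)) := by
  rw [popBackWhile]
  rw [dropWhile_eq_filter_of_mono _ dq1.reverse
    (by
      rw [List.pairwise_reverse]
      exact hpair1.imp (by intro a b hab h; simp at h ⊢; omega))]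
  rw [← List.filter_reverse, List.reverse_reverse]

-- the head of the (front-popped) deque is the window maximum
lemma dq_head_eq (arr : List Int) (k i : Int) (dq1 : List Int)
    (h0 : 0 ≤ i) (h1 : i < arr.length)
    (hbnd1 : ∀ j ∈ dq1, 0 ≤ j ∧ j < i ∧ i - k + 1 ≤ j)
    (hpair1 : dq1.Pairwise (fun a b => a < b ∧ PySem.List.pyGetD arr b 0 < PySem.List.pyGetD arr a 0))
    (hdom1 : ∀ t : Int, i - k + 1 ≤ t → 0 ≤ t → t < i →
      ∃ j ∈ dq1, t ≤ j ∧ PySem.List.pyGetD arr t 0 ≤ PySem.List.pyGetD arr j 0) :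
    (match dq1 with
      | [] => (none : Option Int)
      | j :: _ => some (PySem.List.pyGetD arr j 0)) =
        maxOpt (PySem.List.slice arr (some (max (i - k + 1) 0)) (some i)) := by
  cases dq1 with
  | nil =>
    symm
    rw [show (none : Option Int) = maxOpt [] from rfl]
    apply maxOpt_eq_of_mem
    intro y
    simp only [List.not_mem_nil, iff_false]
    intro hy
    rw [mem_slice_iff _ _ _ _ (le_max_right _ _) h0] at hy
    obtain ⟨t, ht1, ht2, ht3, rfl⟩ := hy
    obtain ⟨j, hj, _, _⟩ := hdom1 t (le_trans (le_max_left _ _) ht1) (by positivity) ht2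
    cases hj
  | cons j0 rest =>
    obtain ⟨hj00, hj0i, hj0lo⟩ := hbnd1 j0 List.mem_cons_self
    have hj0mem : PySem.List.pyGetD arr j0 0 ∈
        PySem.List.slice arr (some (max (i - k + 1) 0)) (some i) := by
      rw [mem_slice_iff _ _ _ _ (le_max_right _ _) h0]
      refine ⟨j0.toNat, by omega, by omega, by omega, ?_⟩
      rw [PySem.List.pyGetD_eq_getElem arr 0 hj00 (by omega),
          List.getD_eq_getElem arr 0 (by omega)]
    cases hM : maxOpt (PySem.List.slice arr (some (max (i - k + 1) 0)) (some i)) with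
    | none =>
      exfalso
      rw [maxOpt_eq_none_iff] at hM
      rw [hM] at hj0mem
      cases hj0mem
    | some M =>
      have hle : PySem.List.pyGetD arr j0 0 ≤ M := maxOpt_ub hM _ hj0mem
      have hge : M ≤ PySem.List.pyGetD arr j0 0 := by
        have hMmem := maxOpt_mem hM
        rw [mem_slice_iff _ _ _ _ (le_max_right _ _) h0] at hMmem
        obtain ⟨t, ht1, ht2, ht3, hMv⟩ := hMmem
        obtain ⟨j, hj, hjt, hjv⟩ := hdom1 t (le_trans (le_max_left _ _) ht1) (by positivity) ht2
        have hjle : PySem.List.pyGetD arr j 0 ≤ PySem.List.pyGetD arr j0 0 := by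
          rcases List.mem_cons.1 hj with h' | h'
          · rw [h']
          · exact ((List.pairwise_cons.1 hpair1).1 j h').2.le
        have hMt : M = PySem.List.pyGetD arr (t : Int) 0 := by
          rw [hMv]; simp
        exact hMt ▸ le_trans hjv hjle
      simp [le_antisymm hle hge]

-- one step of the deque pass: output correct, invariant maintained
lemma winmaxStep_spec (arr : List Int) (k i : Int) (dq : List Int)
    (h0 : 0 ≤ i) (h1 : i < arr.length) (hinv : dqInv arr k i dq) :
    (match dq.dropWhile (fun j => decide (j < i - k + 1)) with
      | [] => (none : Option Int)
      | j :: _ => some (PySem.List.pyGetD arr j 0)) =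
        maxOpt (PySem.List.slice arr (some (max (i - k + 1) 0)) (some i)) ∧
    dqInv arr k (i + 1)
      (popBackWhile (fun j => decide (PySem.List.pyGetD arr j 0 ≤ PySem.List.pyGetD arr i 0))
        (dq.dropWhile (fun j => decide (j < i - k + 1))) ++ [i]) := by
  obtain ⟨hbnd, hpair, hdom⟩ := hinv
  have hfront : dq.dropWhile (fun j => decide (j < i - k + 1)) =
      dq.filter (fun j => ! decide (j < i - k + 1)) := by
    apply dropWhile_eq_filter_of_mono
    exact hpair.imp (by intro a b hab h; simp at h ⊢; omega)
  have hmem1 : ∀ j, j ∈ dq.dropWhile (fun j => decide (j < i - k + 1)) ↔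
      j ∈ dq ∧ i - k + 1 ≤ j := by
    intro j
    rw [hfront, List.mem_filter]
    simp
  have hpair1 : (dq.dropWhile (fun j => decide (j < i - k + 1))).Pairwise
      (fun a b => a < b ∧ PySem.List.pyGetD arr b 0 < PySem.List.pyGetD arr a 0) := by
    rw [hfront]; exact hpair.filter _
  have hbnd1 : ∀ j ∈ dq.dropWhile (fun j => decide (j < i - k + 1)), 0 ≤ j ∧ j < i ∧ i - k + 1 ≤ j := by
    intro j hj
    obtain ⟨hj1, hj2⟩ := (hmem1 j).1 hj
    obtain ⟨h', h''⟩ := hbnd j hj1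
    exact ⟨h', h'', hj2⟩
  have hdom1 : ∀ t : Int, i - k + 1 ≤ t → 0 ≤ t → t < i →
      ∃ j ∈ dq.dropWhile (fun j => decide (j < i - k + 1)), t ≤ j ∧
        PySem.List.pyGetD arr t 0 ≤ PySem.List.pyGetD arr j 0 := by
    intro t ht1 ht2 ht3
    obtain ⟨j, hj, hjt, hjv⟩ := hdom t ht1 ht2 ht3
    exact ⟨j, (hmem1 j).2 ⟨hj, by omega⟩, hjt, hjv⟩
  have hback := popBack_filter arr (PySem.List.pyGetD arr i 0)
      (dq.dropWhile (fun j => decide (j < i - k + 1))) hpair1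
  refine ⟨dq_head_eq arr k i _ h0 h1 hbnd1 hpair1 hdom1, ?_, ?_, ?_⟩
  · -- bounds
    intro j hj
    rw [hback, List.mem_append] at hj
    rcases hj with hj | hj
    · have := (hbnd1 j (List.mem_of_mem_filter hj)).1
      have := (hbnd1 j (List.mem_of_mem_filter hj)).2.1
      omega
    · simp at hj
      omega
  · -- pairwise
    rw [hback]
    apply List.pairwise_append.2
    refine ⟨hpair1.filter _, List.pairwise_singleton _ _, ?_⟩
    intro a ha b hb
    rw [List.mem_singleton] at hb
    subst hb
    have hcond := List.of_mem_filter ha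
    simp only [Bool.not_eq_eq_eq_not, Bool.not_true, decide_eq_false_iff_not, not_le] at hcond
    have := (hbnd1 a (List.mem_of_mem_filter ha)).2.1
    exact ⟨by omega, hcond⟩
  · -- domination
    intro t ht1 ht2 ht3
    by_cases hti : t = i
    · subst hti
      exact ⟨t, by simp, le_refl _, le_refl _⟩
    · have hti' : t < i := by omega
      obtain ⟨j, hj, hjt, hjv⟩ := hdom1 t (by omega) ht2 hti'
      by_cases hjp : PySem.List.pyGetD arr j 0 ≤ PySem.List.pyGetD arr i 0
      · exact ⟨i, by simp, by omega, le_trans hjv hjp⟩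
      · refine ⟨j, ?_, hjt, hjv⟩
        rw [hback, List.mem_append]
        left
        exact List.mem_filter.2 ⟨hj, by simp [hjp]⟩

-- the whole deque pass computes all window maxima
lemma winmax_go (arr : List Int) (k : Int) :
    ∀ i : Nat, i ≤ arr.length →
      ∃ dq, dqInv arr k (i : Int) dq ∧
        (PySem.List.pyRange 0 (i : Int) 1).foldl (winmaxStep arr k) ([], []) =
          ((PySem.List.pyRange 0 (i : Int) 1).map
            (fun j => maxOpt (PySem.List.slice arr (some (max (j - k + 1) 0)) (some j))), dq) := by
  intro i
  induction i with
  | zero =>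
    intro _
    refine ⟨[], ⟨?_, ?_, ?_⟩, ?_⟩
    · intro j hj; cases hj
    · exact List.Pairwise.nil
    · intro t ht1 ht2 ht3; omega
    · rw [PySem.List.pyRange_one_eq_nil (by norm_num)]
      rfl
  | succ i ih =>
    intro hle
    obtain ⟨dq, hinv, heq⟩ := ih (by omega)
    have h1 : (i : Int) < arr.length := by exact_mod_cast hle
    have hcast : ((i + 1 : Nat) : Int) = (i : Int) + 1 := by push_cast; ring
    obtain ⟨hout, hinv'⟩ := winmaxStep_spec arr k (i : Int) dq (by positivity) h1 hinv
    refine ⟨popBackWhile (fun j => decide (PySem.List.pyGetD arr j 0 ≤ PySem.List.pyGetD arr (i:Int) 0))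
        (dq.dropWhile (fun j => decide (j < (i:Int) - k + 1))) ++ [(i:Int)], ?_, ?_⟩
    · rw [hcast]; exact hinv'
    · have hsplit : PySem.List.pyRange 0 ((i + 1 : Nat) : Int) 1 =
          PySem.List.pyRange 0 (i : Int) 1 ++ [(i : Int)] := by
        rw [hcast, PySem.List.pyRange_one_succ_right (by positivity)]
      rw [hsplit, List.foldl_append, List.map_append, heq, List.foldl_cons, List.foldl_nil,
          List.map_cons, List.map_nil, winmaxStep]
      dsimp only
      rw [hout]

lemma winmax_eq (arr : List Int) (k : Int) :
    winmax arr k = (PySem.List.pyRange 0 (arr.length : Int) 1).map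
      (fun j => maxOpt (PySem.List.slice arr (some (max (j - k + 1) 0)) (some j))) := by
  obtain ⟨dq, _, heq⟩ := winmax_go arr k arr.length (le_refl _)
  rw [winmax, PySem.List.len_eq, heq]

lemma pyGetD_winmax (arr : List Int) (k i : Int) (h0 : 0 ≤ i) (h1 : i < arr.length) :
    PySem.List.pyGetD (winmax arr k) i none =
      maxOpt (PySem.List.slice arr (some (max (i - k + 1) 0)) (some i)) := by
  rw [winmax_eq]
  exact PySem.List.pyGetD_map_pyRange_of_nonneg _ _ _ _ h0 h1

lemma pyGetD_reverse_map (g : Int → Option Int) (n : Nat) (i : Int) (h0 : 0 ≤ i) (h1 : i < n) :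
    PySem.List.pyGetD ((PySem.List.pyRange 0 (n : Int) 1).map g).reverse i none =
      g ((n : Int) - 1 - i) := by
  have hlen : (((PySem.List.pyRange 0 (n:Int) 1).map g).reverse).length = n := by
    simp [PySem.List.length_pyRange_one]
  rw [PySem.List.pyGetD_eq_getElem _ none h0 (by rw [hlen]; exact_mod_cast h1)]
  rw [List.getElem_reverse, List.getElem_map, PySem.List.getElem_pyRange_one]
  congr 1
  have := Int.toNat_of_nonneg h0
  simp only [List.length_map, PySem.List.length_pyRange_one]
  omega

-- right window of i in stones = left window of (n-1-i) in the reversed list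
lemma wOptR_rev (stones : List Int) (k i : Int) (hk : 0 < k) (h0 : 0 ≤ i) (h1 : i < stones.length) :
    maxOpt (PySem.List.slice stones.reverse
        (some (max ((stones.length : Int) - 1 - i - k + 1) 0)) (some ((stones.length : Int) - 1 - i))) =
      maxOpt (PySem.List.slice stones (some (i + 1)) (some (i + k))) := by
  apply maxOpt_eq_of_mem
  intro y
  rw [mem_slice_iff _ _ _ _ (le_max_right _ _) (by omega),
      mem_slice_iff _ _ _ _ (by omega) (by omega)]
  constructor
  · rintro ⟨j, hj1, hj2, hj3, rfl⟩
    rw [List.length_reverse] at hj3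
    have hj1' := le_trans (le_max_left _ _) hj1
    refine ⟨stones.length - 1 - j, by omega, by omega, by omega, ?_⟩
    rw [List.getD_eq_getElem _ _ (by rw [List.length_reverse]; omega),
        List.getElem_reverse, List.getD_eq_getElem _ _ (by omega)]
  · rintro ⟨t, ht1, ht2, ht3, rfl⟩
    refine ⟨stones.length - 1 - t, ?_, by omega, by rw [List.length_reverse]; omega, ?_⟩
    · rw [max_le_iff]
      constructor <;> omega
    · symm
      rw [List.getD_eq_getElem _ _ (by rw [List.length_reverse]; omega),
          List.getElem_reverse, List.getD_eq_getElem _ _ (by omega)]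
      congr 1
      omega

-- ---- B's final scan as a running minimum over the candidate list ----

def keepOpt : Option Int → List Int
  | none => []
  | some cv => if 0 < cv then [cv] else []

def ominStep (b : Option Int) (cv : Int) : Option Int :=
  match b with
  | none => some cv
  | some bv => if cv < bv then some cv else b

lemma bestUpd_eq_foldl (b : Option Int) (c : Option Int) :
    bestUpd b c = (keepOpt c).foldl ominStep b := by
  cases c with
  | none => rfl
  | some cv =>
    by_cases h : 0 < cv
    · cases b <;> simp [bestUpd, keepOpt, ominStep, h]
    · cases b <;> simp [bestUpd, keepOpt, h]

lemma foldl_flatMap_eq {α β σ : Type} (l : List α) (f : α → List β) (g : σ → β → σ) :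
    ∀ s : σ, (l.flatMap f).foldl g s = l.foldl (fun s a => (f a).foldl g s) s := by
  induction l with
  | nil => intro s; rfl
  | cons a l ih =>
    intro s
    rw [List.flatMap_cons, List.foldl_append, List.foldl_cons]
    exact ih _

lemma ominStep_some (l : List Int) : ∀ bv : Int, l.foldl ominStep (some bv) = some (l.foldl min bv) := by
  induction l with
  | nil => intro bv; rfl
  | cons c l ih =>
    intro bv
    rw [List.foldl_cons, List.foldl_cons]
    have h : ominStep (some bv) c = some (min bv c) := by
      rw [ominStep]
      rcases lt_or_ge c bv with h | h
      · rw [if_pos h, min_eq_right h.le]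
      · rw [if_neg (not_lt.2 h), min_eq_left h]
    rw [h, ih]

-- the candidates contributed by one (index, value) pair
def entE (stones : List Int) (k m : Int) (p : Int × Int) : List Int :=
  if p.2 = m then
    keepOpt (maxOpt (PySem.List.slice stones (some (max (p.1 - k + 1) 0)) (some p.1))) ++
    keepOpt (maxOpt (PySem.List.slice stones (some (p.1 + 1)) (some (p.1 + k))))
  else []

-- A's 'push iff the 0-initialised running max is nonzero' = keep the positive true maximum
lemma push_vs_keep (w : List Int) :
    (if w.foldl max 0 ≠ 0 then [w.foldl max 0] else []) = keepOpt (maxOpt w) := by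
  cases w with
  | nil => simp [keepOpt, maxOpt]
  | cons x t =>
    have hF : (x :: t).foldl max 0 = max 0 (t.foldl max x) := by
      rw [List.foldl_cons, foldl_max_shift]
    rw [hF, maxOpt]
    by_cases hT : 0 < t.foldl max x
    · simp [keepOpt, max_eq_right hT.le, hT, ne_of_gt hT]
    · have h0 : max 0 (t.foldl max x) = 0 := max_eq_left (not_lt.1 hT)
      simp [keepOpt, h0, hT]

-- B's scan = running minimum of the flattened candidate list
lemma bfold_eq (stones : List Int) (k m : Int) (hk : 0 < k) :
    (PySem.List.pyRange 0 (PySem.List.len stones) 1).foldl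
      (fun b i =>
        if PySem.List.pyGetD stones i 0 = m then
          bestUpd (bestUpd b (PySem.List.pyGetD (winmax stones k) i none))
            (PySem.List.pyGetD ((winmax stones.reverse k).reverse) i none)
        else b) none
      = ((PySem.List.enumerate stones 0).flatMap (entE stones k m)).foldl ominStep none := by
  have hbody : ∀ (acc : Option Int), ∀ i ∈ PySem.List.pyRange 0 (PySem.List.len stones) 1,
      (if PySem.List.pyGetD stones i 0 = m then
          bestUpd (bestUpd acc (PySem.List.pyGetD (winmax stones k) i none))
            (PySem.List.pyGetD ((winmax stones.reverse k).reverse) i none)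
        else acc) =
      (entE stones k m (i, PySem.List.pyGetD stones i 0)).foldl ominStep acc := by
    intro acc i hi
    rw [PySem.List.mem_pyRange_one, PySem.List.len_eq] at hi
    obtain ⟨h0, h1⟩ := hi
    rw [pyGetD_winmax stones k i h0 h1]
    have hR : PySem.List.pyGetD ((winmax stones.reverse k).reverse) i none =
        maxOpt (PySem.List.slice stones (some (i + 1)) (some (i + k))) := by
      rw [winmax_eq stones.reverse k, List.length_reverse,
          pyGetD_reverse_map _ stones.length i h0 (by exact_mod_cast h1),
          wOptR_rev stones k i hk h0 (by exact_mod_cast h1)]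
    rw [hR, bestUpd_eq_foldl, bestUpd_eq_foldl, ← List.foldl_append]
    by_cases hv : PySem.List.pyGetD stones i 0 = m
    · rw [if_pos hv, entE, if_pos hv]
    · rw [if_neg hv, entE, if_neg hv]
      rfl
  rw [PySem.List.foldl_congr_mem _ _ _ none hbody]
  rw [foldl_flatMap_eq, PySem.List.enumerate_eq_map_pyRange stones 0, List.foldl_map]

-- the multiset A pushes = the candidate list B scans
lemma pushes_flat (stones : List Int) (k : Int) (hk : 0 < k) :
    (((PySem.List.enumerate stones 0).filter (fun p => p.2 = minSent stones)).map (·.1)).flatMap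
        (pushesA stones k) =
      (PySem.List.enumerate stones 0).flatMap (entE stones k (minSent stones)) := by
  rw [List.flatMap_map]
  rw [flatMap_filter_of_nil (PySem.List.enumerate stones 0)
      (fun p => decide (p.2 = minSent stones)) (entE stones k (minSent stones))
      (by intro p hp hpf; rw [entE, if_neg (by simpa using hpf)])]
  apply List.flatMap_congr
  intro p hp
  have hval : p.2 = minSent stones := by simpa using List.of_mem_filter hp
  obtain ⟨j, hjlt, hjeq⟩ := (PySem.List.mem_enumerate_iff _ _ _).1 (List.mem_of_mem_filter hp)
  have h0 : 0 ≤ p.1 := by rw [hjeq]; simp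
  have h1 : p.1 < stones.length := by rw [hjeq]; simpa using hjlt
  rw [pushesA, entE, if_pos hval,
      leftMaxA_eq stones k p.1 hk h0 h1, rightMaxA_eq stones k p.1 hk h0 h1,
      push_vs_keep, push_vs_keep]

-- ===== VERDICT (by name: the statement is the Claim_ definition above) =====
theorem solution_spec : Claim_equal_solution := by
  intro stones k hdom hpre
  obtain ⟨p, hpmem, hpval, q, hqmem, hqpos, hqne, hd1, hd2⟩ := hpre
  obtain ⟨pi, hpi, hpeq⟩ := (PySem.List.mem_enumerate_iff _ _ _).1 hpmem
  obtain ⟨qi, hqi, hqeq⟩ := (PySem.List.mem_enumerate_iff _ _ _).1 hqmem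
  have hp1 : p.1 = (pi : Int) := by rw [hpeq]; simp
  have hp2 : p.2 = stones[pi] := by rw [hpeq]
  have hq1 : q.1 = (qi : Int) := by rw [hqeq]; simp
  have hq2 : q.2 = stones[qi] := by rw [hqeq]
  have hk : 0 < k := by omega
  have hm_le : ∀ y ∈ stones, minSent stones ≤ y :=
    fun y hy => (PySem.List.foldl_min_le stones 200000001).2 y hy
  have hm_mem : minSent stones ∈ stones := by
    rw [← hpval, hp2]; exact List.getElem_mem hpi
  have hminq : (PySem.List.min? stones (fun x => x)).getD 0 = minSent stones :=
    min?_getD_eq_minSent stones hm_mem hm_le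
  show solution stones k = solution_alt stones k
  simp only [solution, solution_alt, loop1_char, hminq,
    PySem.List.slice?_none_none_neg_one, Option.getD_some]
  rw [bfold_eq stones k (minSent stones) hk]
  have hIsEmpty : IsHeap ([] : List Int) := by
    intro j hj hlen
    simp at hlen
  obtain ⟨hH, hP⟩ := solLoop2_spec stones k
    (((PySem.List.enumerate stones 0).filter (fun p => p.2 = minSent stones)).map (·.1)) [] hIsEmpty
  rw [List.nil_append, pushes_flat stones k hk] at hP
  -- the candidate list is nonempty: q's value sits in one of p's windows
  have hcne : ∃ c, c ∈ (PySem.List.enumerate stones 0).flatMap (entE stones k (minSent stones)) := by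
    rcases lt_or_gt_of_ne hqne with hlt | hgt
    · -- q is in the left window of p
      have hmemw : q.2 ∈ PySem.List.slice stones (some (max (p.1 - k + 1) 0)) (some p.1) := by
        rw [mem_slice_iff _ _ _ _ (le_max_right _ _) (by omega)]
        refine ⟨qi, by rw [max_le_iff]; omega, by omega, hqi, ?_⟩
        rw [hq2, List.getD_eq_getElem stones 0 hqi]
      cases hM : maxOpt (PySem.List.slice stones (some (max (p.1 - k + 1) 0)) (some p.1)) with
      | none =>
        exfalso
        rw [maxOpt_eq_none_iff] at hM
        rw [hM] at hmemw
        cases hmemw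
      | some M =>
        have hM0 : 0 < M := lt_of_lt_of_le hqpos (maxOpt_ub hM _ hmemw)
        refine ⟨M, List.mem_flatMap.2 ⟨p, hpmem, ?_⟩⟩
        rw [entE, if_pos hpval, hM]
        simp [keepOpt, hM0]
    · -- q is in the right window of p
      have hmemw : q.2 ∈ PySem.List.slice stones (some (p.1 + 1)) (some (p.1 + k)) := by
        rw [mem_slice_iff _ _ _ _ (by omega) (by omega)]
        refine ⟨qi, by omega, by omega, hqi, ?_⟩
        rw [hq2, List.getD_eq_getElem stones 0 hqi]
      cases hM : maxOpt (PySem.List.slice stones (some (p.1 + 1)) (some (p.1 + k))) with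
      | none =>
        exfalso
        rw [maxOpt_eq_none_iff] at hM
        rw [hM] at hmemw
        cases hmemw
      | some M =>
        have hM0 : 0 < M := lt_of_lt_of_le hqpos (maxOpt_ub hM _ hmemw)
        refine ⟨M, List.mem_flatMap.2 ⟨p, hpmem, ?_⟩⟩
        rw [entE, if_pos hpval, hM]
        simp [keepOpt, hM0]
  obtain ⟨c0, hc0⟩ := hcne
  cases hc : (PySem.List.enumerate stones 0).flatMap (entE stones k (minSent stones)) with
  | nil =>
    exfalso
    rw [hc] at hc0
    cases hc0
  | cons c t =>
    rw [hc] at hP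
    rw [List.foldl_cons, show ominStep none c = some c from rfl, ominStep_some,
        Option.getD_some]
    have hne : solLoop2 stones k
        (((PySem.List.enumerate stones 0).filter (fun p => p.2 = minSent stones)).map (·.1)) [] ≠ [] := by
      intro h0
      rw [h0] at hP
      have := hP.length_eq
      simp at this
    obtain ⟨hrmem, hrle⟩ := heap_root_min _ hH hne
    have hBmem : t.foldl min c ∈ c :: t := by
      rcases PySem.List.foldl_min_mem t c with h' | h'
      · rw [h']; exact List.mem_cons_self
      · exact List.mem_cons_of_mem _ h'
    have hBle : ∀ y ∈ c :: t, t.foldl min c ≤ y := by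
      intro y hy
      rcases List.mem_cons.1 hy with h' | h'
      · rw [h']; exact (PySem.List.foldl_min_le t c).1
      · exact (PySem.List.foldl_min_le t c).2 y h'
    rw [PySem.List.pyGetD_zero]
    exact le_antisymm (hrle _ (hP.mem_iff.2 hBmem)) (hBle _ (hP.mem_iff.1 hrmem))
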